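-- pv_equiv track=rewrite | github.com/icclab/cosbench-plot | parser/StageFileParser.py | _expandHeader
-- ===== SOURCE A (Python) =====
-- def _expandHeader(headerTokens):
--     '''
--     Replicates header tokens in any empty following token.
--     E.g.: from 'a,,b,c,,' to 'a,a,b,c,c,c'
--     '''
--     expandedHeader = []
--     prevtoken = headerTokens[0]
--     assert(len(prevtoken) is not 0)
--     for token in headerTokens:
--         if len(token) is 0:
--             expandedHeader.append(prevtoken)
--         else:
--             expandedHeader.append(token)
--             prevtoken = token
--     return expandedHeader
-- ===== SOURCE B (Python) =====
-- def _expandHeader(headerTokens):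
--     assert len(headerTokens[0]) != 0
--     out = []
--     i = 0
--     n = len(headerTokens)
--     while i < n:
--         t = headerTokens[i]
--         j = i + 1
--         while j < n and len(headerTokens[j]) == 0:
--             j += 1
--         out.extend([t] * (j - i))
--         i = j
--     return out
-- ===== Notes on version B (the rewrite author's own statement) =====
-- stated objective: alternative
-- what changed: Replaces the per-token loop that maintains a prevtoken variable with run-length expansion: scan to the end of each run of empty tokens and emit the preceding non-empty token replicated over the whole run at once.
import Mathlib
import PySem

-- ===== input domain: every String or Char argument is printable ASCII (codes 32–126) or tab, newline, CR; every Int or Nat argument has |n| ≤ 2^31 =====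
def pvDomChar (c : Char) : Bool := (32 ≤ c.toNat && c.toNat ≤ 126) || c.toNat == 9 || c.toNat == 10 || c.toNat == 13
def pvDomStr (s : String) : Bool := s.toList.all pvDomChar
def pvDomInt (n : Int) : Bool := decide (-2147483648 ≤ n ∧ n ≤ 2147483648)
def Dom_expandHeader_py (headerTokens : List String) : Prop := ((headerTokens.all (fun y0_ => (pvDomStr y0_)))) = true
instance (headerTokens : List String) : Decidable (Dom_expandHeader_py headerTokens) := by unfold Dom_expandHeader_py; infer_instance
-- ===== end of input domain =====

-- B replaces A's per-token loop maintaining a prevtoken with run-length expansion over runs of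
-- empty tokens (objective: alternative decomposition, same O(n) cost).


-- ===== PORT A =====
-- loop: state (expandedHeader, prevtoken); value where Python raises (IndexError/AssertionError)
-- is junk and excluded by Pre_.
def expandHeader_py (headerTokens : List String) : List String :=
  match PySem.List.pyGet? headerTokens 0 with
  | none => []  -- headerTokens[0] raises IndexError: excluded by Pre_
  | some p0 =>
    if p0 = "" then []  -- assert fails (AssertionError): excluded by Pre_
    else
      (headerTokens.foldl
        (fun (st : List String × String) token =>
          if token = "" then (st.1 ++ [st.2], st.2)
          else (st.1 ++ [token], token))
        ([], p0)).1

-- ===== PORT B =====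
-- outer while-loop iteration = one step of runB: the inner while-loop scanning the run of empty
-- tokens is the takeWhile/dropWhile split; out.extend([t]*(j-i)) is the replicate block.
def runB : List String → List String
  | [] => []
  | t :: rest =>
    List.replicate ((rest.takeWhile (fun s => s = "")).length + 1) t ++
      runB (rest.dropWhile (fun s => s = ""))
termination_by l => l.length
decreasing_by
  simpa using Nat.lt_succ_of_le (List.length_dropWhile_le _ _)

def expandHeader_py_alt (headerTokens : List String) : List String :=
  match headerTokens with
  | [] => []  -- headerTokens[0] raises IndexError: excluded by Pre_
  | t :: _ =>
    if t = "" then []  -- assert fails: excluded by Pre_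
    else runB headerTokens

-- ===== PRECONDITION & SPEC =====
-- Pre_: exactly the inputs on which A returns (non-empty list, non-empty first token).
def Pre_expandHeader_py (headerTokens : List String) : Prop :=
  headerTokens ≠ [] ∧ headerTokens.headD "" ≠ ""
instance (headerTokens : List String) : Decidable (Pre_expandHeader_py headerTokens) := by
  unfold Pre_expandHeader_py; infer_instance
def pvWitness_expandHeader_py : List String := ["a", "", "b", ""]

def Spec_expandHeader_py (headerTokens : List String) (out : List String) : Prop := out = expandHeader_py_alt headerTokens
instance (headerTokens : List String) (out : List String) : Decidable (Spec_expandHeader_py headerTokens out) := by unfold Spec_expandHeader_py; infer_instance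

-- ===== CLAIM (what is proved, stated in full; the proofs are below) =====
def Claim_equal_expandHeader_py : Prop := ∀ (headerTokens : List String), Dom_expandHeader_py headerTokens → Pre_expandHeader_py headerTokens → Spec_expandHeader_py headerTokens (expandHeader_py headerTokens)

-- ===== LEMMAS AND PROOFS =====
-- A's loop over a run of empty tokens followed by r just appends prevtoken once per empty token.
theorem foldl_empties (es : List String) (hes : ∀ e ∈ es, e = "")
    (r : List String) (acc : List String) (p : String) :
    ((es ++ r).foldl
      (fun (st : List String × String) token =>
        if token = "" then (st.1 ++ [st.2], st.2)
        else (st.1 ++ [token], token))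
      (acc, p)) =
    (r.foldl
      (fun (st : List String × String) token =>
        if token = "" then (st.1 ++ [st.2], st.2)
        else (st.1 ++ [token], token))
      (acc ++ List.replicate es.length p, p)) := by
  induction es generalizing acc with
  | nil => simp
  | cons e es ih =>
    have he : e = "" := hes e (by simp)
    have hes' : ∀ e ∈ es, e = "" := fun x hx => hes x (by simp [hx])
    simp only [List.cons_append, List.foldl_cons, he, if_true]
    rw [ih hes']
    simp [List.replicate_succ, List.append_assoc]

-- the first element surviving dropWhile fails the predicate
theorem dropWhile_head_not (P : String → Bool) :
    ∀ (l : List String), match l.dropWhile P with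
      | [] => True
      | x :: _ => P x = false := by
  intro l
  induction l with
  | nil => simp [List.dropWhile]
  | cons a l ih =>
    by_cases h : P a <;> simp [List.dropWhile, h]
    · exact ih

-- main invariant: on a list whose head is non-empty, A's loop produces acc ++ runB h
theorem foldl_eq_runB (n : Nat) : ∀ (h : List String), h.length ≤ n →
    (match h with | [] => True | x :: _ => x ≠ "") →
    ∀ (acc : List String) (p : String),
    ((h.foldl
      (fun (st : List String × String) token =>
        if token = "" then (st.1 ++ [st.2], st.2)
        else (st.1 ++ [token], token))
      (acc, p))).1 = acc ++ runB h := by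
  induction n with
  | zero =>
    intro h hlen _ acc p
    have : h = [] := List.length_eq_zero_iff.mp (Nat.le_zero.mp hlen)
    subst this; simp [runB]
  | succ n ih =>
    intro h hlen hhead acc p
    match h with
    | [] => simp [runB]
    | t :: rest =>
      have ht : t ≠ "" := hhead
      have hsplit : rest.takeWhile (fun s => s = "") ++ rest.dropWhile (fun s => s = "") = rest :=
        List.takeWhile_append_dropWhile
      have hes : ∀ e ∈ rest.takeWhile (fun s => s = ""), e = "" := by
        intro e he
        simpa using List.mem_takeWhile_imp he
      simp only [List.foldl_cons, if_neg ht]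
      rw [← hsplit, foldl_empties _ hes]
      have hlen' : (rest.dropWhile (fun s => s = "")).length ≤ n := by
        have h1 := List.length_dropWhile_le (fun s => s = "") rest
        have h2 : rest.length + 1 ≤ n + 1 := by simpa using hlen
        omega
      have hhead' : match rest.dropWhile (fun s => s = "") with
          | [] => True | x :: _ => x ≠ "" := by
        have := dropWhile_head_not (fun s => s = "") rest
        match hm : rest.dropWhile (fun s => s = "") with
        | [] => trivial
        | x :: xs => simpa [hm] using this
      rw [ih _ hlen' hhead']
      rw [runB]
      simp [List.replicate_succ, List.append_assoc]

-- ===== VERDICT (by name: the statement is the Claim_ definition above) =====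
theorem expandHeader_py_spec : Claim_equal_expandHeader_py := by
  intro h _ hpre
  match h with
  | [] => exact absurd rfl hpre.1
  | t :: rest =>
    have ht : t ≠ "" := by simpa using hpre.2
    have hrun := foldl_eq_runB (t :: rest).length (t :: rest) le_rfl ht [] t
    simp only [List.foldl_cons, if_neg ht, List.nil_append] at hrun
    simp [Spec_expandHeader_py, expandHeader_py, expandHeader_py_alt,
      PySem.List.pyGet?, PySem.List.pyIdx?, ht, hrun]
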